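-- pv_equiv track=rewrite | github.com/freefacedman/Vire | Vire/symbiont_core/reflector/reflection_tree_builder.py | grow_tree
-- ===== SOURCE A (Python) =====
-- def grow_tree(reflections, layers=2):
--     tree = {}
--     current_layer = reflections
--     for depth in range(layers):
--         next_layer = []
--         for reflection in current_layer:
--             sub_questions = [
--                 f'Why is \"{reflection}\" significant?',
--                 f'What could challenge \"{reflection}\"?'
--             ]
--             tree[reflection] = sub_questions
--             next_layer.extend(sub_questions)
--         current_layer = next_layer
--     return tree
-- ===== SOURCE B (Python) =====
-- def grow_tree(reflections, layers=2):
--     def subs(r):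
--         return [f'Why is "{r}" significant?', f'What could challenge "{r}"?']
--
--     def keys_from(layer, depth):
--         if depth <= 0:
--             return []
--         return list(layer) + keys_from([q for r in layer for q in subs(r)], depth - 1)
--
--     return {k: subs(k) for k in keys_from(reflections, layers)}
-- ===== Notes on version B (the rewrite author's own statement) =====
-- stated objective: alternative
-- what changed: Replaces the layer-by-layer BFS loop that interleaves dict insertion with next-layer building by a two-phase recursive decomposition: a recursive keys_from enumerates all keys layer by layer, then a single dict comprehension maps each key to its two sub-questions.
import Mathlib
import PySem

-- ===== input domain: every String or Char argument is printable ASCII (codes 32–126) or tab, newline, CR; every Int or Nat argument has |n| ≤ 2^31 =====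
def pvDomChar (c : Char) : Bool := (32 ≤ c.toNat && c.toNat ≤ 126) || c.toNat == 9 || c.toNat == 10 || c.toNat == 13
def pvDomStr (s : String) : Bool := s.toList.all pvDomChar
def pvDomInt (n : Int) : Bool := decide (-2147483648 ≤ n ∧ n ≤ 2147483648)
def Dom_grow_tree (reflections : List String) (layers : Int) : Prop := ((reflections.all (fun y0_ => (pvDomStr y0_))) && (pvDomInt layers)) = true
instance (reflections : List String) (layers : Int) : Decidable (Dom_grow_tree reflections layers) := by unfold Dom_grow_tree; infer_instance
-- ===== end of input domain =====

-- B changes the decomposition: a recursive key enumeration followed by one dict comprehension,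
-- instead of A's BFS layer loop interleaving dict insertion with next-layer building.

-- ===== PORT A =====
-- literal port of A: for depth in range(layers): for reflection in current_layer: build subs,
-- tree[reflection] = subs, next_layer.extend(subs); state = (tree, current_layer)
def grow_tree (reflections : List String) (layers : Int) : List (String × List String) :=
  (((PySem.List.pyRange 0 layers 1).foldl
      (fun (st : PySem.Dict String (List String) × List String) _depth =>
        st.2.foldl
          (fun (st2 : PySem.Dict String (List String) × List String) reflection =>
            let sub_questions : List String :=
              ["Why is \"" ++ reflection ++ "\" significant?",
               "What could challenge \"" ++ reflection ++ "\"?"]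
            (st2.1.insert reflection sub_questions, st2.2 ++ sub_questions))
          (st.1, []))
      (PySem.Dict.empty, reflections)).1).items

-- ===== PORT B =====
-- literal port of Source B
def pvSubs (r : String) : List String :=
  ["Why is \"" ++ r ++ "\" significant?", "What could challenge \"" ++ r ++ "\"?"]

def pvKeysFrom (layer : List String) (depth : Int) : List String :=
  if depth ≤ 0 then []
  else layer ++ pvKeysFrom (layer.flatMap pvSubs) (depth - 1)
termination_by depth.toNat
decreasing_by omega

def grow_tree_alt (reflections : List String) (layers : Int) : List (String × List String) :=
  ((pvKeysFrom reflections layers).foldl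
      (fun (d : PySem.Dict String (List String)) k => d.insert k (pvSubs k))
      PySem.Dict.empty).items

-- ===== PRECONDITION & SPEC =====
def Spec_grow_tree (reflections : List String) (layers : Int) (out : List (String × List String)) : Prop := out = grow_tree_alt reflections layers
instance (reflections : List String) (layers : Int) (out : List (String × List String)) : Decidable (Spec_grow_tree reflections layers out) := by unfold Spec_grow_tree; infer_instance

-- ===== CLAIM (what is proved, stated in full; the proofs are below) =====
def Claim_equal_grow_tree : Prop := ∀ (reflections : List String) (layers : Int), Dom_grow_tree reflections layers → Spec_grow_tree reflections layers (grow_tree reflections layers)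

-- ===== LEMMAS AND PROOFS =====

-- A's inner loop over one layer: the dict part is a plain insert-fold and the
-- accumulated next_layer is acc ++ layer.flatMap pvSubs.
theorem pv_inner_loop (layer : List String)
    (tree : PySem.Dict String (List String)) (acc : List String) :
    layer.foldl
      (fun (st2 : PySem.Dict String (List String) × List String) reflection =>
        let sub_questions : List String :=
          ["Why is \"" ++ reflection ++ "\" significant?",
           "What could challenge \"" ++ reflection ++ "\"?"]
        (st2.1.insert reflection sub_questions, st2.2 ++ sub_questions))
      (tree, acc)
    = (layer.foldl (fun (d : PySem.Dict String (List String)) k => d.insert k (pvSubs k)) tree,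
       acc ++ layer.flatMap pvSubs) := by
  induction layer generalizing tree acc with
  | nil => simp
  | cons r rest ih => simp [ih, pvSubs, List.flatMap_cons]

-- A's outer loop over any index list l equals B's insert-fold over pvKeysFrom with depth = l.length.
theorem pv_outer_loop (l : List Int)
    (tree : PySem.Dict String (List String)) (layer : List String) :
    (l.foldl
      (fun (st : PySem.Dict String (List String) × List String) _depth =>
        st.2.foldl
          (fun (st2 : PySem.Dict String (List String) × List String) reflection =>
            let sub_questions : List String :=
              ["Why is \"" ++ reflection ++ "\" significant?",
               "What could challenge \"" ++ reflection ++ "\"?"]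
            (st2.1.insert reflection sub_questions, st2.2 ++ sub_questions))
          (st.1, []))
      (tree, layer)).1
    = (pvKeysFrom layer (l.length : Int)).foldl
        (fun (d : PySem.Dict String (List String)) k => d.insert k (pvSubs k)) tree := by
  induction l generalizing tree layer with
  | nil => rw [pvKeysFrom]; simp
  | cons a rest ih =>
      rw [List.foldl_cons]
      have h1 := pv_inner_loop layer tree []
      simp only [List.nil_append] at h1
      simp only [List.length_cons]
      push_cast
      rw [show (pvKeysFrom layer ((rest.length : Int) + 1)) =
            layer ++ pvKeysFrom (layer.flatMap pvSubs) (rest.length : Int) by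
        rw [pvKeysFrom]; simp]
      rw [h1, ih, List.foldl_append]

-- pvKeysFrom only depends on max depth 0; lets us replace (pyRange length : Int) by layers.
theorem pv_keysFrom_nonpos (layer : List String) (d : Int) (h : d ≤ 0) :
    pvKeysFrom layer d = [] := by
  rw [pvKeysFrom]; simp [h]

theorem pv_keysFrom_toNat (layer : List String) (d : Int) :
    pvKeysFrom layer ((d.toNat : Nat) : Int) = pvKeysFrom layer d := by
  by_cases h : d ≤ 0
  · rw [pv_keysFrom_nonpos layer d h, pv_keysFrom_nonpos]
    omega
  · have : ((d.toNat : Nat) : Int) = d := by omega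
    rw [this]

-- ===== VERDICT (by name: the statement is the Claim_ definition above) =====
theorem grow_tree_spec : Claim_equal_grow_tree := by
  intro reflections layers _
  unfold Spec_grow_tree grow_tree grow_tree_alt
  rw [pv_outer_loop]
  congr 2
  rw [PySem.List.length_pyRange_one]
  simpa using pv_keysFrom_toNat reflections layers
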